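-- pv_equiv track=rewrite | github.com/DYNOVA-ET/total_capital-webapp-intranet | config/password_validator.py | get_password_checklist
-- ===== SOURCE A (Python) =====
-- def get_password_checklist(password: str) -> dict[str, bool]:
--     """
--     Returns a dict with password requirements and their status.
--     """
--     return {
--         "Mínimo 12 caracteres": len(password) >= 12,
--         "Al menos una mayúscula": any(c.isupper() for c in password),
--         "Al menos una minúscula": any(c.islower() for c in password),
--         "Al menos un número": any(c.isdigit() for c in password),
--         "Al menos un carácter especial (!@#$%^&* etc.)": any(c in "!@#$%^&*()_+-=[]{}|;:,.<>?" for c in password),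
--     }
-- ===== SOURCE B (Python) =====
-- SPECIALS = "!@#$%^&*()_+-=[]{}|;:,.<>?"
--
-- def get_password_checklist(password: str) -> dict[str, bool]:
--     """Single pass over the password maintaining four flags (instead of four scans)."""
--     has_upper = has_lower = has_digit = has_special = False
--     for c in password:
--         if c.isupper():
--             has_upper = True
--         elif c.islower():
--             has_lower = True
--         elif c.isdigit():
--             has_digit = True
--         if c in SPECIALS:
--             has_special = True
--     return {
--         "Mínimo 12 caracteres": len(password) >= 12,
--         "Al menos una mayúscula": has_upper,
--         "Al menos una minúscula": has_lower,
--         "Al menos un número": has_digit,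
--         "Al menos un carácter especial (!@#$%^&* etc.)": has_special,
--     }
-- ===== Notes on version B (the rewrite author's own statement) =====
-- stated objective: alternative
-- what changed: Replaces four independent any(...) generator scans of the password with a single traversal that accumulates four boolean flags (upper/lower/digit/special) in one pass.
import Mathlib
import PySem

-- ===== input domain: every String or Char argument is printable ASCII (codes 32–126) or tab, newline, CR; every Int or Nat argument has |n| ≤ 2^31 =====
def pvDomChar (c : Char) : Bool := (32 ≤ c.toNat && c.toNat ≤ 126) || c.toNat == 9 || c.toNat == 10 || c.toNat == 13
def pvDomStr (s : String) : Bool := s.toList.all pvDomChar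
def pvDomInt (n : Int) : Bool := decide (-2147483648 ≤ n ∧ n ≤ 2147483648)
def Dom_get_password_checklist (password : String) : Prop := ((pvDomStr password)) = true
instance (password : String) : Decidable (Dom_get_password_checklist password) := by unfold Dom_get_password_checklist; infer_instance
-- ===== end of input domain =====

-- B performs one traversal with four accumulated flags instead of A's four any(...) scans.

-- ===== PORT A =====
-- the special-character literal "!@#$%^&*()_+-=[]{}|;:,.<>?" shared by both ports
def pvSpecials : List Char := "!@#$%^&*()_+-=[]{}|;:,.<>?".toList

def get_password_checklist (password : String) : List (String × Bool) :=
  [("Mínimo 12 caracteres", decide (12 ≤ PySem.Str.len password)),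
   ("Al menos una mayúscula", password.toList.any (fun c => PySem.Chars.isupper c)),
   ("Al menos una minúscula", password.toList.any (fun c => PySem.Chars.islower c)),
   ("Al menos un número", password.toList.any (fun c => PySem.Chars.isdigit c)),
   ("Al menos un carácter especial (!@#$%^&* etc.)",
     password.toList.any (fun c => pvSpecials.contains c))]

-- ===== PORT B =====
-- the loop body of Source B: if/elif chain on one character, plus the special check
def pvStep (st : Bool × Bool × Bool × Bool) (c : Char) : Bool × Bool × Bool × Bool :=
  let (u, l, d, s) := st
  let (u, l, d) :=
    if PySem.Chars.isupper c then (true, l, d)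
    else if PySem.Chars.islower c then (u, true, d)
    else if PySem.Chars.isdigit c then (u, l, true)
    else (u, l, d)
  let s := if pvSpecials.contains c then true else s
  (u, l, d, s)

def get_password_checklist_alt (password : String) : List (String × Bool) :=
  let st := password.toList.foldl pvStep (false, false, false, false)
  [("Mínimo 12 caracteres", decide (12 ≤ PySem.Str.len password)),
   ("Al menos una mayúscula", st.1),
   ("Al menos una minúscula", st.2.1),
   ("Al menos un número", st.2.2.1),
   ("Al menos un carácter especial (!@#$%^&* etc.)", st.2.2.2)]

-- ===== PRECONDITION & SPEC =====
def Spec_get_password_checklist (password : String) (out : List (String × Bool)) : Prop := out = get_password_checklist_alt password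
instance (password : String) (out : List (String × Bool)) : Decidable (Spec_get_password_checklist password out) := by unfold Spec_get_password_checklist; infer_instance

-- ===== CLAIM (what is proved, stated in full; the proofs are below) =====
def Claim_equal_get_password_checklist : Prop := ∀ (password : String), Dom_get_password_checklist password → Spec_get_password_checklist password (get_password_checklist password)

-- ===== LEMMAS AND PROOFS =====

-- a character is never in two of the upper/lower/digit classes, so the elif chain
-- accumulates exactly the three 'any' results (and the special flag the fourth)
theorem pvUpNotLow (c : Char) (h : PySem.Chars.isupper c = true) : PySem.Chars.islower c = false := by
  simp [PySem.Chars.isupper, PySem.Chars.islower, Char.le_def, UInt32.le_iff_toNat_le] at *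
  omega

theorem pvUpNotDig (c : Char) (h : PySem.Chars.isupper c = true) : PySem.Chars.isdigit c = false := by
  simp [PySem.Chars.isupper, PySem.Chars.isdigit, Char.le_def, UInt32.le_iff_toNat_le] at *
  omega

theorem pvLowNotDig (c : Char) (h : PySem.Chars.islower c = true) : PySem.Chars.isdigit c = false := by
  simp [PySem.Chars.islower, PySem.Chars.isdigit, Char.le_def, UInt32.le_iff_toNat_le] at *
  omega

theorem pvStep_foldl (cs : List Char) (u l d s : Bool) :
    cs.foldl pvStep (u, l, d, s) =
      (u || cs.any (fun c => PySem.Chars.isupper c),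
       l || cs.any (fun c => PySem.Chars.islower c),
       d || cs.any (fun c => PySem.Chars.isdigit c),
       s || cs.any (fun c => pvSpecials.contains c)) := by
  induction cs generalizing u l d s with
  | nil => simp
  | cons c cs ih =>
    simp only [List.foldl_cons, List.any_cons]
    by_cases hu : PySem.Chars.isupper c = true
    · simp [pvStep, hu, pvUpNotLow c hu, pvUpNotDig c hu, ih, Bool.or_assoc, Bool.or_comm]
    · by_cases hl : PySem.Chars.islower c = true
      · simp [pvStep, hu, hl, pvLowNotDig c hl, ih, Bool.or_assoc, Bool.or_comm]
      · by_cases hd : PySem.Chars.isdigit c = true <;>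
          simp [pvStep, hu, hl, hd, ih, Bool.or_assoc, Bool.or_comm]

-- ===== VERDICT (by name: the statement is the Claim_ definition above) =====
theorem get_password_checklist_spec : Claim_equal_get_password_checklist := by
  intro password _
  unfold Spec_get_password_checklist get_password_checklist get_password_checklist_alt
  simp [pvStep_foldl]
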